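-- pv_equiv track=rewrite | github.com/applabsa/Targets-CalstarNetwork | streamlit_app.py | get_last_six_months
-- ===== SOURCE A (Python) =====
-- def get_last_six_months(selected_month, selected_year):
--     month_order = ["Jan", "Feb", "Mar", "Apr", "May", "Jun",
--                    "Jul", "Aug", "Sep", "Oct", "Nov", "Dec"]
--     current_month_index = month_order.index(selected_month)
--     months = []
--     for i in range(6):
--         index = (current_month_index - i) % 12
--         month = month_order[index]
--         year = selected_year
--         if index > current_month_index:
--             year -= 1
--         months.append((month, year))
--     return months[::-1]
-- ===== SOURCE B (Python) =====
-- def get_last_six_months(selected_month, selected_year):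
--     month_order = ["Jan", "Feb", "Mar", "Apr", "May", "Jun",
--                    "Jul", "Aug", "Sep", "Oct", "Nov", "Dec"]
--     i = month_order.index(selected_month)
--     names = (month_order + month_order)[i + 7:i + 13]
--     k = max(0, 5 - i)
--     years = [selected_year - 1] * k + [selected_year] * (6 - k)
--     return list(zip(names, years))
-- ===== Notes on version B (the rewrite author's own statement) =====
-- stated objective: alternative
-- what changed: Replaces A's per-iteration modular index loop with conditional year decrement and final reversal by a loop-free construction: slice the six names out of a doubled month list and zip them with a years list made of max(0,5-i) previous-year entries followed by current-year entries.
import Mathlib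
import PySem

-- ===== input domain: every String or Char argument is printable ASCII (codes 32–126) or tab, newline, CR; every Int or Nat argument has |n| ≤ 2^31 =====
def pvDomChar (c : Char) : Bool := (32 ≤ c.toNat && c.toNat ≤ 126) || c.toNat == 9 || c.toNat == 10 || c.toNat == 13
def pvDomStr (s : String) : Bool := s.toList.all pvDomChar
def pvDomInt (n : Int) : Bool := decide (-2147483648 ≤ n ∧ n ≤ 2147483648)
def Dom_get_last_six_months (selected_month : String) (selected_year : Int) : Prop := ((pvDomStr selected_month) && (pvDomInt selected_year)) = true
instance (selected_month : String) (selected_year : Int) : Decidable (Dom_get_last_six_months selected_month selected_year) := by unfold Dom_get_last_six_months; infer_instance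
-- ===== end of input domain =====

-- B drops A's modular loop entirely: it slices the six month names out of a doubled month
-- list and zips them with a precomputed years list (objective: alternative, same O(1) cost).

def pvMonthOrder : List String :=
  ["Jan", "Feb", "Mar", "Apr", "May", "Jun",
   "Jul", "Aug", "Sep", "Oct", "Nov", "Dec"]

-- ===== PORT A =====
def get_last_six_months (selected_month : String) (selected_year : Int) : List (String × Int) :=
  match PySem.List.index? pvMonthOrder selected_month with
  | none => []   -- ValueError from list.index; excluded by Pre_
  | some current_month_index =>
    let months : List (String × Int) :=
      (PySem.List.pyRange 0 6 1).foldl (fun acc i =>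
        let index := PySem.Int.mod ((current_month_index : Int) - i) 12
        let month := (PySem.List.pyGet? pvMonthOrder index).getD ""   -- index ∈ [0,12): never none
        let year := if index > (current_month_index : Int) then selected_year - 1 else selected_year
        acc ++ [(month, year)]) []
    (PySem.List.slice? months none none (-1)).getD []   -- months[::-1]

-- ===== PORT B =====
def get_last_six_months_alt (selected_month : String) (selected_year : Int) : List (String × Int) :=
  match PySem.List.index? pvMonthOrder selected_month with
  | none => []   -- ValueError from list.index; excluded by Pre_
  | some i =>
    let names := PySem.List.slice (pvMonthOrder ++ pvMonthOrder)
      (some ((i : Int) + 7)) (some ((i : Int) + 13))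
    let k : Int := max 0 (5 - (i : Int))
    let years := List.replicate k.toNat (selected_year - 1) ++
                 List.replicate (6 - k).toNat selected_year
    names.zip years

-- ===== PRECONDITION & SPEC =====
-- Pre_: list.index raises ValueError when selected_month is not one of the twelve month names.
def Pre_get_last_six_months (selected_month : String) (_selected_year : Int) : Prop :=
  selected_month ∈ pvMonthOrder
instance (selected_month : String) (selected_year : Int) : Decidable (Pre_get_last_six_months selected_month selected_year) := by unfold Pre_get_last_six_months; infer_instance
def pvWitness_get_last_six_months : String × Int := ("Mar", 2024)

def Spec_get_last_six_months (selected_month : String) (selected_year : Int) (out : List (String × Int)) : Prop := out = get_last_six_months_alt selected_month selected_year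
instance (selected_month : String) (selected_year : Int) (out : List (String × Int)) : Decidable (Spec_get_last_six_months selected_month selected_year out) := by unfold Spec_get_last_six_months; infer_instance

-- ===== CLAIM (what is proved, stated in full; the proofs are below) =====
def Claim_equal_get_last_six_months : Prop := ∀ (selected_month : String) (selected_year : Int), Dom_get_last_six_months selected_month selected_year → Pre_get_last_six_months selected_month selected_year → Spec_get_last_six_months selected_month selected_year (get_last_six_months selected_month selected_year)

-- ===== LEMMAS AND PROOFS =====

set_option maxHeartbeats 2000000 in
theorem pv_case (m : String) (hm : m ∈ pvMonthOrder) (y : Int) :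
    get_last_six_months m y = get_last_six_months_alt m y := by
  rcases h : PySem.List.index? pvMonthOrder m with _ | k
  · exact absurd hm ((PySem.List.index?_eq_none_iff _ _).mp h)
  · have hk : k < 12 := by
      obtain ⟨hlt, -⟩ := PySem.List.getElem_of_index?_eq_some h
      simpa [pvMonthOrder] using hlt
    simp only [PySem.List.index?_eq_idxOf?, pvMonthOrder] at h
    interval_cases k <;>
      simp [get_last_six_months, get_last_six_months_alt, h,
        PySem.List.slice?_none_none_neg_one, PySem.List.slice,
        PySem.List.pyRange, PySem.Int.mod_eq_emod_of_pos,
        pvMonthOrder, List.range_succ, List.replicate, List.zip]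

-- ===== VERDICT (by name: the statement is the Claim_ definition above) =====
theorem get_last_six_months_spec : Claim_equal_get_last_six_months := by
  intro m y _ hpre
  exact pv_case m hpre y
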